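-- pv_equiv track=rewrite | github.com/Bboywil97/compiladores | app.py | analizar_lexico
-- ===== SOURCE A (Python) =====
-- from collections import Counter
--
-- class TipoToken:
--     IDENTIFICADOR = "IDENTIFICADOR"
--     NUMERO = "NUMERO"
--     OPERADOR = "OPERADOR"
--     SIMBOLO = "SIMBOLO"
--     PALABRA_RESERVADA = "PALABRA RESERVADA"
--     DESCONOCIDO = "DESCONOCIDO"
--
-- PALABRAS_RESERVADAS = {"int", "float", "if", "else", "for", "while", "return", "void", "char", "double", "switch", "case", "break", "continue", "default", "do", "goto", "sizeof", "typedef", "static", "extern", "const", "volatile", "register", "inline", "restrict", "auto", "enum", "struct", "union", "sizeof", "typedef", "asm", "goto", "volatile", "const"}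
--
-- def es_operador(c):
--     return c in {'+', '-', '*', '/', '=', '>', '<', '!', '&', '|', '^', '%', '~', '+=', '-=', '*=', '/=', '==', '!=', '>=', '<=', '&&', '||'}
--
-- def es_simbolo(c):
--     return c in {'(', ')', '{', '}', '[', ']', ';', ','}
--
-- def analizar_lexico(codigo):
--     tokens = []
--     tabla_simbolos = set()
--     contador_tokens = Counter()
--     i = 0
--     line_number = 1  # Contador de líneas
--     while i < len(codigo):
--         if codigo[i] == '\n':
--             line_number += 1  # Incrementar el número de línea cuando se encuentra un salto de línea
--             i += 1
--             continue
--
--         if codigo[i].isspace():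
--             i += 1
--             continue
--
--         if codigo[i].isdigit():
--             j = i
--             while j < len(codigo) and (codigo[j].isdigit() or codigo[j] == '.'):
--                 j += 1
--             lexema = codigo[i:j]
--             tokens.append((TipoToken.NUMERO, lexema, line_number))
--             tabla_simbolos.add((TipoToken.NUMERO, lexema))
--             contador_tokens[TipoToken.NUMERO] += 1
--             i = j
--             continue
--
--         if codigo[i].isalpha():
--             j = i
--             while j < len(codigo) and (codigo[j].isalnum() or codigo[j] == '_'):
--                 j += 1
--             lexema = codigo[i:j]
--             tipo = TipoToken.PALABRA_RESERVADA if lexema in PALABRAS_RESERVADAS else TipoToken.IDENTIFICADOR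
--             tokens.append((tipo, lexema, line_number))
--             tabla_simbolos.add((tipo, lexema))
--             contador_tokens[tipo] += 1
--             i = j
--             continue
--
--         if es_operador(codigo[i]):
--             tokens.append((TipoToken.OPERADOR, codigo[i], line_number))
--             tabla_simbolos.add((TipoToken.OPERADOR, codigo[i]))
--             contador_tokens[TipoToken.OPERADOR] += 1
--             i += 1
--             continue
--
--         if es_simbolo(codigo[i]):
--             tokens.append((TipoToken.SIMBOLO, codigo[i], line_number))
--             tabla_simbolos.add((TipoToken.SIMBOLO, codigo[i]))
--             contador_tokens[TipoToken.SIMBOLO] += 1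
--             i += 1
--             continue
--
--         tokens.append((TipoToken.DESCONOCIDO, codigo[i], line_number))
--         tabla_simbolos.add((TipoToken.DESCONOCIDO, codigo[i]))
--         contador_tokens[TipoToken.DESCONOCIDO] += 1
--         i += 1
--
--     return tokens, tabla_simbolos, contador_tokens
-- ===== SOURCE B (Python) =====
-- from collections import Counter
--
-- PALABRAS_RESERVADAS = {"int", "float", "if", "else", "for", "while", "return", "void", "char", "double", "switch", "case", "break", "continue", "default", "do", "goto", "sizeof", "typedef", "static", "extern", "const", "volatile", "register", "inline", "restrict", "auto", "enum", "struct", "union", "asm"}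
--
-- OPERADORES = set("+-*/=><!&|^%~")
-- SIMBOLOS = set("(){}[];,")
--
--
-- def analizar_lexico(codigo):
--     # One-character-at-a-time finite automaton with a pending-token buffer:
--     # no inner scanning loops, no index arithmetic, no slicing.
--     tokens = []
--     tabla_simbolos = set()
--     contador_tokens = Counter()
--
--     def emitir(tipo, lexema, linea):
--         tokens.append((tipo, lexema, linea))
--         tabla_simbolos.add((tipo, lexema))
--         contador_tokens[tipo] += 1
--
--     def descargar(estado, buf, linea):
--         # flush the automaton's pending token, if any
--         if estado == 'NUM':
--             emitir("NUMERO", buf, linea)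
--         elif estado == 'ID':
--             tipo = "PALABRA RESERVADA" if buf in PALABRAS_RESERVADAS else "IDENTIFICADOR"
--             emitir(tipo, buf, linea)
--
--     estado, buf, linea = None, '', 1
--     for c in codigo:
--         if estado == 'NUM' and (c.isdigit() or c == '.'):
--             buf += c
--             continue
--         if estado == 'ID' and (c.isalnum() or c == '_'):
--             buf += c
--             continue
--         descargar(estado, buf, linea)
--         estado, buf = None, ''
--         if c == '\n':
--             linea += 1
--         elif c.isspace():
--             pass
--         elif c.isdigit():
--             estado, buf = 'NUM', c
--         elif c.isalpha():
--             estado, buf = 'ID', c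
--         elif c in OPERADORES:
--             emitir("OPERADOR", c, linea)
--         elif c in SIMBOLOS:
--             emitir("SIMBOLO", c, linea)
--         else:
--             emitir("DESCONOCIDO", c, linea)
--     descargar(estado, buf, linea)
--     return tokens, tabla_simbolos, contador_tokens
-- ===== Notes on version B (the rewrite author's own statement) =====
-- stated objective: alternative
-- what changed: B replaces A's two-level greedy scanner (outer index loop with inner while-loops that look ahead and slice out each lexeme) by a one-character-at-a-time finite automaton: a single for-loop over the characters that carries a pending-token state and buffer, extends or flushes it per character, with a final flush at end of input; no index arithmetic, no inner loops, no slicing.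
import Mathlib
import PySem

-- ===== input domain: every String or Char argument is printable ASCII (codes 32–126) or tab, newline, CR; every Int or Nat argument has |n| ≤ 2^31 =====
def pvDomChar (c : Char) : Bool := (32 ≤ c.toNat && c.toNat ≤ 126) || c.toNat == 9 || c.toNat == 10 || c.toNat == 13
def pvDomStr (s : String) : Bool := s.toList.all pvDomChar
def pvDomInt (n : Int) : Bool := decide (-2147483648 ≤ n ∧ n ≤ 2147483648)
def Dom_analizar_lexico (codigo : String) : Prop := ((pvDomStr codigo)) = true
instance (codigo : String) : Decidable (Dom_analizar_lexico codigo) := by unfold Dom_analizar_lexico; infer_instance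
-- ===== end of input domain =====

-- B replaces A's two-level greedy scanner by a one-character-at-a-time finite automaton
-- with a pending-token buffer and a final flush; objective: alternative algorithm, same cost.

-- ===== PORT A =====
-- shared token-table constants (pure data, used by both ports)
def pvReservadas : List String := ["int", "float", "if", "else", "for", "while", "return", "void", "char", "double", "switch", "case", "break", "continue", "default", "do", "goto", "sizeof", "typedef", "static", "extern", "const", "volatile", "register", "inline", "restrict", "auto", "enum", "struct", "union", "asm"]

def es_operador (c : String) : Bool :=
  (["+", "-", "*", "/", "=", ">", "<", "!", "&", "|", "^", "%", "~", "+=", "-=", "*=", "/=", "==", "!=", ">=", "<=", "&&", "||"] : List String).contains c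

def es_simbolo (c : String) : Bool :=
  (["(", ")", "{", "}", "[", "]", ";", ","] : List String).contains c

-- continuation conditions of A's two inner `while` loops
def pvNumCont (c : Char) : Bool := PySem.Chars.isdigit c || c == '.'
def pvIdCont (c : Char) : Bool := PySem.Chars.isalnum c || c == '_'

-- A's inner `while j < len … : j += 1` loop: splits off the longest prefix satisfying p
-- (A re-tests position i itself, which is known to satisfy p, so the run starts after i)
def pvRun (p : Char → Bool) : List Char → List Char × List Char
  | [] => ([], [])
  | c :: t => if p c then ((pvRun p t).1.cons c, (pvRun p t).2) else ([], c :: t)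

theorem pvRun_snd_length_le (p : Char → Bool) (cs : List Char) : (pvRun p cs).2.length ≤ cs.length := by
  induction cs with
  | nil => simp [pvRun]
  | cons c t ih =>
    by_cases h : p c = true
    · simp [pvRun, h]; omega
    · simp [pvRun, h]

-- A's outer `while i < len(codigo)` loop; state = (tokens, tabla_simbolos, contador_tokens)
def pvScanA : List Char → Int → List (String × String × Int) → PySem.Set (String × String) → PySem.Dict String Int → List (String × String × Int) × PySem.Set (String × String) × PySem.Dict String Int
  | [], _, toks, tab, cnt => (toks, tab, cnt)
  | c :: t, ln, toks, tab, cnt =>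
    if c = '\n' then pvScanA t (ln + 1) toks tab cnt
    else if PySem.Chars.isspace c then pvScanA t ln toks tab cnt
    else if PySem.Chars.isdigit c then
      let lex := String.ofList (c :: (pvRun pvNumCont t).1)
      pvScanA (pvRun pvNumCont t).2 ln (toks ++ [("NUMERO", lex, ln)]) (tab.add ("NUMERO", lex)) (cnt.modify "NUMERO" 0 (· + 1))
    else if PySem.Chars.isalpha c then
      let lex := String.ofList (c :: (pvRun pvIdCont t).1)
      let tipo := if pvReservadas.contains lex then "PALABRA RESERVADA" else "IDENTIFICADOR"
      pvScanA (pvRun pvIdCont t).2 ln (toks ++ [(tipo, lex, ln)]) (tab.add (tipo, lex)) (cnt.modify tipo 0 (· + 1))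
    else if es_operador (String.ofList [c]) then
      pvScanA t ln (toks ++ [("OPERADOR", String.ofList [c], ln)]) (tab.add ("OPERADOR", String.ofList [c])) (cnt.modify "OPERADOR" 0 (· + 1))
    else if es_simbolo (String.ofList [c]) then
      pvScanA t ln (toks ++ [("SIMBOLO", String.ofList [c], ln)]) (tab.add ("SIMBOLO", String.ofList [c])) (cnt.modify "SIMBOLO" 0 (· + 1))
    else
      pvScanA t ln (toks ++ [("DESCONOCIDO", String.ofList [c], ln)]) (tab.add ("DESCONOCIDO", String.ofList [c])) (cnt.modify "DESCONOCIDO" 0 (· + 1))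
termination_by cs => cs.length
decreasing_by
  all_goals simp only [List.length_cons]
  · omega
  · omega
  · exact Nat.lt_succ_of_le (pvRun_snd_length_le pvNumCont t)
  · exact Nat.lt_succ_of_le (pvRun_snd_length_le pvIdCont t)
  all_goals omega

def analizar_lexico (codigo : String) : (List (String × String × Int)) × (List (String × String)) × (List (String × Int)) :=
  let r := pvScanA codigo.toList 1 [] PySem.Set.empty PySem.Dict.empty
  (r.1, r.2.1, r.2.2.items)

-- ===== PORT B =====
def pvOperChars : List Char := ['+', '-', '*', '/', '=', '>', '<', '!', '&', '|', '^', '%', '~']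
def pvSimChars : List Char := ['(', ')', '{', '}', '[', ']', ';', ',']

-- the automaton's pending-token state: none, a number in progress, or a word in progress
inductive PvPend
  | nada
  | num (buf : List Char)
  | ident (buf : List Char)
deriving DecidableEq, Repr

-- the shared accumulator (tokens, tabla_simbolos, contador_tokens)
def pvEmit (tipo lexema : String) (linea : Int)
    (acc : List (String × String × Int) × PySem.Set (String × String) × PySem.Dict String Int) :
    List (String × String × Int) × PySem.Set (String × String) × PySem.Dict String Int :=
  (acc.1 ++ [(tipo, lexema, linea)], acc.2.1.add (tipo, lexema), acc.2.2.modify tipo 0 (· + 1))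

-- Source B's `descargar`: flush the pending token, if any
def pvDescargar (estado : PvPend) (linea : Int)
    (acc : List (String × String × Int) × PySem.Set (String × String) × PySem.Dict String Int) :
    List (String × String × Int) × PySem.Set (String × String) × PySem.Dict String Int :=
  match estado with
  | .nada => acc
  | .num buf => pvEmit "NUMERO" (String.ofList buf) linea acc
  | .ident buf =>
    let lex := String.ofList buf
    pvEmit (if pvReservadas.contains lex then "PALABRA RESERVADA" else "IDENTIFICADOR") lex linea acc

-- the `if/elif` chain run on a character when no token is pending (after a flush)
def pvClasificar (c : Char) (linea : Int)
    (acc : List (String × String × Int) × PySem.Set (String × String) × PySem.Dict String Int) :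
    PvPend × Int × (List (String × String × Int) × PySem.Set (String × String) × PySem.Dict String Int) :=
  if c = '\n' then (.nada, linea + 1, acc)
  else if PySem.Chars.isspace c then (.nada, linea, acc)
  else if PySem.Chars.isdigit c then (.num [c], linea, acc)
  else if PySem.Chars.isalpha c then (.ident [c], linea, acc)
  else if pvOperChars.contains c then (.nada, linea, pvEmit "OPERADOR" (String.ofList [c]) linea acc)
  else if pvSimChars.contains c then (.nada, linea, pvEmit "SIMBOLO" (String.ofList [c]) linea acc)
  else (.nada, linea, pvEmit "DESCONOCIDO" (String.ofList [c]) linea acc)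

-- the body of Source B's single `for c in codigo` loop
def pvStep (st : PvPend × Int × (List (String × String × Int) × PySem.Set (String × String) × PySem.Dict String Int)) (c : Char) :
    PvPend × Int × (List (String × String × Int) × PySem.Set (String × String) × PySem.Dict String Int) :=
  match st with
  | (.num buf, linea, acc) =>
    if pvNumCont c then (.num (buf ++ [c]), linea, acc)
    else pvClasificar c linea (pvDescargar (.num buf) linea acc)
  | (.ident buf, linea, acc) =>
    if pvIdCont c then (.ident (buf ++ [c]), linea, acc)
    else pvClasificar c linea (pvDescargar (.ident buf) linea acc)
  | (.nada, linea, acc) => pvClasificar c linea acc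

def analizar_lexico_alt (codigo : String) : (List (String × String × Int)) × (List (String × String)) × (List (String × Int)) :=
  let st := codigo.toList.foldl pvStep (.nada, 1, ([], PySem.Set.empty, PySem.Dict.empty))
  let acc := pvDescargar st.1 st.2.1 st.2.2
  (acc.1, acc.2.1, acc.2.2.items)

-- ===== PRECONDITION & SPEC =====
def Spec_analizar_lexico (codigo : String) (out : (List (String × String × Int)) × (List (String × String)) × (List (String × Int))) : Prop := out = analizar_lexico_alt codigo
instance (codigo : String) (out : (List (String × String × Int)) × (List (String × String)) × (List (String × Int))) : Decidable (Spec_analizar_lexico codigo out) := by unfold Spec_analizar_lexico; infer_instance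

-- ===== CLAIM (what is proved, stated in full; the proofs are below) =====
def Claim_equal_analizar_lexico : Prop := ∀ (codigo : String), Dom_analizar_lexico codigo → Spec_analizar_lexico codigo (analizar_lexico codigo)

-- ===== LEMMAS AND PROOFS =====

theorem pvRun_eq (p : Char → Bool) (cs : List Char) : pvRun p cs = (cs.takeWhile p, cs.dropWhile p) := by
  induction cs with
  | nil => rfl
  | cons c t ih => by_cases h : p c = true <;> simp [pvRun, ih, List.takeWhile, List.dropWhile, h]

theorem es_operador_char (c : Char) : es_operador (String.ofList [c]) = pvOperChars.contains c := by
  simp [es_operador, pvOperChars, String.ext_iff]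

theorem es_simbolo_char (c : Char) : es_simbolo (String.ofList [c]) = pvSimChars.contains c := by
  simp [es_simbolo, pvSimChars, String.ext_iff]

-- "fold the rest, then flush": the quantity both programs compute
def pvFinishFold (st : PvPend × Int × (List (String × String × Int) × PySem.Set (String × String) × PySem.Dict String Int)) (cs : List Char) :
    List (String × String × Int) × PySem.Set (String × String) × PySem.Dict String Int :=
  let r := cs.foldl pvStep st
  pvDescargar r.1 r.2.1 r.2.2

-- while a number is pending, the automaton consumes exactly the pvNumCont-run,
-- then flushes with the accumulated lexeme at the unchanged line number
theorem pvRun_num (cs : List Char) : ∀ (buf : List Char) (ln : Int) acc,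
    pvFinishFold (PvPend.num buf, ln, acc) cs
      = pvFinishFold (PvPend.nada, ln, pvEmit "NUMERO" (String.ofList (buf ++ cs.takeWhile pvNumCont)) ln acc) (cs.dropWhile pvNumCont) := by
  induction cs with
  | nil => intro buf ln acc; simp [pvFinishFold, pvDescargar]
  | cons c t ih =>
    intro buf ln acc
    by_cases h : pvNumCont c = true
    · simp only [pvFinishFold, List.foldl_cons, pvStep, if_pos h] at *
      rw [ih (buf ++ [c]) ln acc]
      simp [List.takeWhile_cons, List.dropWhile_cons, h]
    · simp only [pvFinishFold, List.foldl_cons, pvStep, if_neg h,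
        List.takeWhile_cons, List.dropWhile_cons, h, if_neg]
      simp [pvDescargar, pvStep]

-- same for a pending word
theorem pvRun_id (cs : List Char) : ∀ (buf : List Char) (ln : Int) acc,
    pvFinishFold (PvPend.ident buf, ln, acc) cs
      = pvFinishFold (PvPend.nada, ln,
          (let lex := String.ofList (buf ++ cs.takeWhile pvIdCont)
           pvEmit (if pvReservadas.contains lex then "PALABRA RESERVADA" else "IDENTIFICADOR") lex ln acc))
          (cs.dropWhile pvIdCont) := by
  induction cs with
  | nil => intro buf ln acc; simp [pvFinishFold, pvDescargar]
  | cons c t ih =>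
    intro buf ln acc
    by_cases h : pvIdCont c = true
    · simp only [pvFinishFold, List.foldl_cons, pvStep, if_pos h] at *
      rw [ih (buf ++ [c]) ln acc]
      simp [List.takeWhile_cons, List.dropWhile_cons, h]
    · simp only [pvFinishFold, List.foldl_cons, pvStep, if_neg h,
        List.takeWhile_cons, List.dropWhile_cons, h, if_neg]
      simp [pvDescargar, pvStep]

-- main invariant: from the no-pending state, the automaton-then-flush equals A's nested scan
theorem pvMain (n : Nat) : ∀ (cs : List Char), cs.length ≤ n → ∀ (ln : Int) toks tab cnt,
    pvFinishFold (PvPend.nada, ln, (toks, tab, cnt)) cs = pvScanA cs ln toks tab cnt := by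
  induction n with
  | zero =>
    intro cs hlen ln toks tab cnt
    have : cs = [] := List.eq_nil_of_length_eq_zero (Nat.le_zero.mp hlen)
    subst this
    simp [pvFinishFold, pvDescargar, pvScanA]
  | succ m ih =>
    intro cs hlen ln toks tab cnt
    cases cs with
    | nil => simp [pvFinishFold, pvDescargar, pvScanA]
    | cons c t =>
      have hlt : t.length ≤ m := by simpa using hlen
      rw [pvScanA.eq_def]
      simp only [pvFinishFold, List.foldl_cons, pvStep, pvClasificar, es_operador_char, es_simbolo_char]
      by_cases hnl : c = '\n'
      · rw [if_pos hnl, if_pos hnl]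
        simpa [pvFinishFold] using ih t hlt (ln + 1) toks tab cnt
      · rw [if_neg hnl, if_neg hnl]
        by_cases hsp : PySem.Chars.isspace c = true
        · rw [if_pos hsp, if_pos hsp]
          simpa [pvFinishFold] using ih t hlt ln toks tab cnt
        · rw [if_neg hsp, if_neg hsp]
          by_cases hdg : PySem.Chars.isdigit c = true
          · rw [if_pos hdg, if_pos hdg]
            have h1 := pvRun_num t [c] ln (toks, tab, cnt)
            simp only [pvFinishFold] at h1 ⊢
            rw [h1]
            have hrec := ih (t.dropWhile pvNumCont) (le_trans (List.length_dropWhile_le _ _) hlt) ln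
              (toks ++ [("NUMERO", String.ofList (c :: t.takeWhile pvNumCont), ln)])
              (tab.add ("NUMERO", String.ofList (c :: t.takeWhile pvNumCont)))
              (cnt.modify "NUMERO" 0 (· + 1))
            simpa [pvFinishFold, pvEmit, pvRun_eq] using hrec
          · rw [if_neg hdg, if_neg hdg]
            by_cases hal : PySem.Chars.isalpha c = true
            · rw [if_pos hal, if_pos hal]
              have h1 := pvRun_id t [c] ln (toks, tab, cnt)
              simp only [pvFinishFold] at h1 ⊢
              rw [h1]
              have hrec := ih (t.dropWhile pvIdCont) (le_trans (List.length_dropWhile_le _ _) hlt) ln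
                (toks ++ [((if pvReservadas.contains (String.ofList (c :: t.takeWhile pvIdCont)) then "PALABRA RESERVADA" else "IDENTIFICADOR"), String.ofList (c :: t.takeWhile pvIdCont), ln)])
                (tab.add ((if pvReservadas.contains (String.ofList (c :: t.takeWhile pvIdCont)) then "PALABRA RESERVADA" else "IDENTIFICADOR"), String.ofList (c :: t.takeWhile pvIdCont)))
                (cnt.modify (if pvReservadas.contains (String.ofList (c :: t.takeWhile pvIdCont)) then "PALABRA RESERVADA" else "IDENTIFICADOR") 0 (· + 1))
              simpa [pvFinishFold, pvEmit, pvRun_eq] using hrec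
            · rw [if_neg hal, if_neg hal]
              by_cases hop : pvOperChars.contains c = true
              · rw [if_pos hop, if_pos hop]
                simpa [pvFinishFold, pvEmit] using ih t hlt ln
                  (toks ++ [("OPERADOR", String.ofList [c], ln)])
                  (tab.add ("OPERADOR", String.ofList [c])) (cnt.modify "OPERADOR" 0 (· + 1))
              · rw [if_neg hop, if_neg hop]
                by_cases hsy : pvSimChars.contains c = true
                · rw [if_pos hsy, if_pos hsy]
                  simpa [pvFinishFold, pvEmit] using ih t hlt ln
                    (toks ++ [("SIMBOLO", String.ofList [c], ln)])
                    (tab.add ("SIMBOLO", String.ofList [c])) (cnt.modify "SIMBOLO" 0 (· + 1))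
                · rw [if_neg hsy, if_neg hsy]
                  simpa [pvFinishFold, pvEmit] using ih t hlt ln
                    (toks ++ [("DESCONOCIDO", String.ofList [c], ln)])
                    (tab.add ("DESCONOCIDO", String.ofList [c])) (cnt.modify "DESCONOCIDO" 0 (· + 1))

-- ===== VERDICT (by name: the statement is the Claim_ definition above) =====
theorem analizar_lexico_spec : Claim_equal_analizar_lexico := by
  intro codigo _
  unfold Spec_analizar_lexico analizar_lexico analizar_lexico_alt
  rw [← pvMain codigo.toList.length codigo.toList le_rfl 1 [] PySem.Set.empty PySem.Dict.empty]
  simp [pvFinishFold]
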